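-- pv_equiv track=rewrite | github.com/witek-formanski/Advent-of-Code-2021 | python/227_advent_2021_day_15_part_1.py | listOfPointsUp
-- ===== SOURCE A (Python) =====
-- def listOfPointsUp(i):		# 0 <= i <= 99
-- 	if i == 0:
-- 		return [[0, 0]]
-- 	elif i >= 1:
-- 		draft = []
-- 		for point in listOfPointsUp(i-1):
-- 			for j in range(2):
-- 				newPoint = point.copy()
-- 				newPoint[j] +=1
-- 				if newPoint not in draft:
-- 					draft.append(newPoint)
-- 		return draft
-- ===== SOURCE B (Python) =====
-- def listOfPointsUp(i):
--     return [[i - k, k] for k in range(i + 1)]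
-- ===== Notes on version B (the rewrite author's own statement) =====
-- stated objective: faster
-- what changed: Replaces the recursive build with duplicate-scanning (quadratic membership tests at every recursion level) by the direct closed-form list [[i-k, k] for k in range(i+1)].
-- outside the precondition, e.g. on listOfPointsUp(-1): A returns None, B returns []
import Mathlib
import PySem

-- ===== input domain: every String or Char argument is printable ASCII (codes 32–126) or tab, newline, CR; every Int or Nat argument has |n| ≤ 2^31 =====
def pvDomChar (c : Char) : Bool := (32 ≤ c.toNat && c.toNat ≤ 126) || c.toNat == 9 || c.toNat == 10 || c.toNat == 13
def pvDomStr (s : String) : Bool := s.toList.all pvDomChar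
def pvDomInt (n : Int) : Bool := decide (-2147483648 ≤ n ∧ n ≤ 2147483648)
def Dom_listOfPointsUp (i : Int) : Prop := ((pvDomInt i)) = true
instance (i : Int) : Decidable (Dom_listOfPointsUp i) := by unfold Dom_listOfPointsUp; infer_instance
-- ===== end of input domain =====

-- B replaces A's recursive duplicate-scanning construction by the closed-form
-- list [[i-k, k] for k in range(i+1)] (measured faster; asymptotic change).

-- ===== PORT A =====
-- literal port of A; the two Python loops become foldls over the same state.
-- range(2) is ported as List.range 2 (indices 0,1 are nonnegative and in range of the
-- 2-element points, so List.set / List.getD are exact for newPoint[j] += 1).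
def listOfPointsUp (i : Int) : List (List Int) :=
  if _h0 : i = 0 then [[0, 0]]
  else if h1 : 1 ≤ i then
    (listOfPointsUp (i - 1)).foldl
      (fun draft point =>
        (List.range 2).foldl
          (fun draft j =>
            let newPoint := point.set j (point.getD j 0 + 1)
            if newPoint ∉ draft then draft ++ [newPoint] else draft)
          draft)
      []
  else []  -- Python falls through and returns None here; excluded by Pre_
termination_by i.toNat
decreasing_by omega

-- ===== PORT B =====
def listOfPointsUp_alt (i : Int) : List (List Int) :=
  (List.range (i.toNat + 1)).map (fun (k : Nat) => [i - (k : Int), (k : Int)])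

-- ===== PRECONDITION & SPEC =====
-- Pre_ excludes exactly the inputs on which A returns no list: i < 0, where A falls off
-- both branches and returns None, and i ≥ 998, where A's recursion depth exceeds CPython's
-- default recursion limit and it raises RecursionError (the source documents 0 <= i <= 99).
def Pre_listOfPointsUp (i : Int) : Prop := 0 ≤ i ∧ i ≤ 997
instance (i : Int) : Decidable (Pre_listOfPointsUp i) := by unfold Pre_listOfPointsUp; infer_instance
def pvWitness_listOfPointsUp : Int := (3)
def Spec_listOfPointsUp (i : Int) (out : List (List Int)) : Prop := out = listOfPointsUp_alt i
instance (i : Int) (out : List (List Int)) : Decidable (Spec_listOfPointsUp i out) := by unfold Spec_listOfPointsUp; infer_instance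

-- ===== CLAIM (what is proved, stated in full; the proofs are below) =====
def Claim_equal_listOfPointsUp : Prop := ∀ (i : Int), Dom_listOfPointsUp i → Pre_listOfPointsUp i → Spec_listOfPointsUp i (listOfPointsUp i)

-- ===== LEMMAS AND PROOFS =====

-- the closed-form level: points [n-k, k] for k = 0 .. taken from a given range
def pvG (n : Int) (k : Nat) : List Int := [n - (k : Int), (k : Int)]

-- A's per-point step (the inner j-loop), extracted for reasoning
def pvStep (draft : List (List Int)) (point : List Int) : List (List Int) :=
  (List.range 2).foldl
    (fun draft j =>
      let newPoint := point.set j (point.getD j 0 + 1)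
      if newPoint ∉ draft then draft ++ [newPoint] else draft)
    draft

lemma pvStep_pair (d : List (List Int)) (x y : Int) :
    pvStep d [x, y] =
      (let d1 := if [x + 1, y] ∉ d then d ++ [[x + 1, y]] else d;
       if [x, y + 1] ∉ d1 then d1 ++ [[x, y + 1]] else d1) := by
  simp [pvStep, List.range_succ, List.set, List.getD]

lemma pvG_not_mem (n : Int) (m : Nat) :
    pvG n m ∉ (List.range m).map (pvG n) := by
  intro hmem
  rcases List.mem_map.mp hmem with ⟨k, hk, hkeq⟩
  have : (k : Int) = (m : Int) := by
    simpa [pvG] using congrArg (fun l => l.getD 1 0) hkeq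
  have hkm : k = m := by exact_mod_cast this
  have := List.mem_range.mp hk
  omega

lemma pvLoop (n : Int) (b : Nat) : ∀ (m : Nat),
    ((List.range' (m + 1) b).map (pvG n)).foldl pvStep ((List.range (m + 2)).map (pvG (n + 1)))
      = (List.range (m + 2 + b)).map (pvG (n + 1)) := by
  induction b with
  | zero => intro m; simp
  | succ b ih =>
    intro m
    rw [List.range'_succ, List.map_cons, List.foldl_cons]
    have hpt : pvG n (m + 1) = [n - ((m : Int) + 1), (m : Int) + 1] := by
      simp [pvG]
    have hstep :
        pvStep ((List.range (m + 2)).map (pvG (n + 1))) (pvG n (m + 1))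
          = (List.range (m + 3)).map (pvG (n + 1)) := by
      rw [hpt, pvStep_pair]
      have hin : [n - ((m : Int) + 1) + 1, (m : Int) + 1] ∈ (List.range (m + 2)).map (pvG (n + 1)) := by
        refine List.mem_map.mpr ⟨m + 1, by simp, ?_⟩
        simp [pvG]; ring
      have hnotin : [n - ((m : Int) + 1), (m : Int) + 1 + 1] ∉ (List.range (m + 2)).map (pvG (n + 1)) := by
        have h2 : pvG (n + 1) (m + 2) = [n - ((m : Int) + 1), (m : Int) + 1 + 1] := by
          simp [pvG]; constructor <;> ring
        rw [← h2]
        exact pvG_not_mem (n + 1) (m + 2)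
      simp only [hin, hnotin, not_true, not_false_iff, if_false, if_true]
      rw [List.range_succ (n := m + 2), List.map_append, List.map_singleton]
      congr 1
      simp [pvG]; constructor <;> ring
    rw [hstep]
    have := ih (m + 1)
    have harith : m + 1 + 2 + b = m + 2 + (b + 1) := by omega
    rw [harith] at this
    simpa using this

lemma pvMain : ∀ (N : Nat), listOfPointsUp (N : Int) = (List.range (N + 1)).map (pvG (N : Int)) := by
  intro N
  induction N with
  | zero => simp [listOfPointsUp, pvG]
  | succ N ih =>
    have h0 : ((N + 1 : Nat) : Int) ≠ 0 := by push_cast; omega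
    have h1 : (1 : Int) ≤ ((N + 1 : Nat) : Int) := by push_cast; omega
    have hsub : ((N + 1 : Nat) : Int) - 1 = (N : Int) := by push_cast; ring
    rw [listOfPointsUp]
    rw [dif_neg h0, dif_pos h1, hsub, ih]
    show ((List.range (N + 1)).map (pvG (N : Int))).foldl pvStep [] = _
    have hsplit : List.range (N + 1) = 0 :: List.range' 1 N := by
      rw [List.range_eq_range', List.range'_succ]
    rw [hsplit, List.map_cons, List.foldl_cons]
    have hfirst : pvStep [] (pvG (N : Int) 0) = (List.range 2).map (pvG ((N : Int) + 1)) := by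
      have h00 : pvG (N : Int) 0 = [(N : Int) - 0, (0 : Int) + 0] := by simp [pvG]
      rw [h00, pvStep_pair]
      simp [List.range_succ, pvG]
    rw [hfirst]
    have := pvLoop (N : Int) N 0
    simp only [Nat.zero_add] at this
    rw [this]
    have hc : ((N + 1 : Nat) : Int) = (N : Int) + 1 := by push_cast; ring
    rw [hc, show 2 + N = N + 1 + 1 by omega]

-- ===== VERDICT (by name: the statement is the Claim_ definition above) =====
theorem listOfPointsUp_spec : Claim_equal_listOfPointsUp := by
  intro i _hdom hpre
  unfold Spec_listOfPointsUp listOfPointsUp_alt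
  obtain ⟨N, rfl⟩ : ∃ N : Nat, i = (N : Int) := ⟨i.toNat, (Int.toNat_of_nonneg hpre.1).symm⟩
  rw [pvMain N]
  simp only [Int.toNat_natCast]
  rfl
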